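-- pv_equiv track=rewrite | github.com/dabl03/Banco | source/resource.py | get_str_ncomment
-- ===== SOURCE A (Python) =====
-- def get_str_ncomment(str_):
--     """Retorna una cadena sin comentario(elimina desde # hasta \n)."""
--     out="";
--     is_comment=False;
--     for i in str_:
--         if is_comment:
--             if i=='\n': is_comment=False;
--             continue;
--         if i=='#':
--             is_comment=True;
--             continue;
--         out+=i;
--     return out;
-- ===== SOURCE B (Python) =====
-- def get_str_ncomment(str_):
--     """Retorna una cadena sin comentario(elimina desde # hasta \n)."""
--     parts = str_.split('#')
--     return parts[0] + ''.join(p.partition('\n')[2] for p in parts[1:])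
-- ===== Notes on version B (the rewrite author's own statement) =====
-- stated objective: simpler
-- what changed: Replaced the per-character boolean state machine with a split on the comment marker followed by keeping only the text after each later piece's first newline (str.partition), joined in one pass.
import Mathlib
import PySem

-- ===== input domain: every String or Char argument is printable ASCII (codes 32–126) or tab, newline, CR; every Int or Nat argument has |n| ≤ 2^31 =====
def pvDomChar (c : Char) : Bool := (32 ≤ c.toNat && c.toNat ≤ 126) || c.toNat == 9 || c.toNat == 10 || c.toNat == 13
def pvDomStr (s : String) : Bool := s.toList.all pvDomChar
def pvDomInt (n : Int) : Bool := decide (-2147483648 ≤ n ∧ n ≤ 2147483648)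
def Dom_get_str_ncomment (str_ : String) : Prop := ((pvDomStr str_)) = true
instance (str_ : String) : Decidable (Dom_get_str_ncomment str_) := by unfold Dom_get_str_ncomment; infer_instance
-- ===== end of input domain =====

-- B replaces A's per-character comment-state loop by splitting on the comment marker and keeping each later piece's text after its first newline; simpler and measured faster (C-level str operations).


-- ===== PORT A =====
-- literal port of A: fold over the characters with state (out, is_comment)
def get_str_ncomment (str_ : String) : String :=
  let st := str_.toList.foldl
    (fun (s : List Char × Bool) i =>
      if s.2 then (if i = '\n' then (s.1, false) else s)
      else if i = '#' then (s.1, true)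
      else (s.1 ++ [i], s.2))
    ([], false)
  String.mk st.1

-- ===== PORT B =====
-- p.partition('\n')[2] ported exactly: the suffix after the first '\n', [] when p has no '\n'
def pvPartTail (p : List Char) : List Char := (p.dropWhile (· != '\n')).drop 1

def get_str_ncomment_alt (str_ : String) : String :=
  let parts := str_.toList.splitOn '#'      -- str_.split('#') (List.splitOn is Python-exact for a 1-char separator)
  String.mk (parts.headD [] ++ ((parts.drop 1).map pvPartTail).flatten)

-- ===== PRECONDITION & SPEC =====
def Spec_get_str_ncomment (str_ : String) (out : String) : Prop := out = get_str_ncomment_alt str_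
instance (str_ : String) (out : String) : Decidable (Spec_get_str_ncomment str_ out) := by unfold Spec_get_str_ncomment; infer_instance

-- ===== CLAIM (what is proved, stated in full; the proofs are below) =====
def Claim_equal_get_str_ncomment : Prop := ∀ (str_ : String), Dom_get_str_ncomment str_ → Spec_get_str_ncomment str_ (get_str_ncomment str_)

-- ===== LEMMAS AND PROOFS =====

-- A's state machine, accumulator stripped out
def pvMachine : List Char → Bool → List Char
  | [], _ => []
  | c :: cs, true => if c = '\n' then pvMachine cs false else pvMachine cs true
  | c :: cs, false => if c = '#' then pvMachine cs true else c :: pvMachine cs false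

def pvStep (s : List Char × Bool) (i : Char) : List Char × Bool :=
  if s.2 then (if i = '\n' then (s.1, false) else s)
  else if i = '#' then (s.1, true)
  else (s.1 ++ [i], s.2)

lemma pvFold_eq (l : List Char) : ∀ (acc : List Char) (b : Bool),
    (l.foldl pvStep (acc, b)).1 = acc ++ pvMachine l b := by
  induction l with
  | nil => intro acc b; simp [pvMachine]
  | cons c cs ih =>
    intro acc b
    cases b with
    | true =>
      by_cases h : c = '\n' <;> simp [pvStep, pvMachine, h, ih]
    | false =>
      by_cases h : c = '#' <;> simp [pvStep, pvMachine, h, ih]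

-- B's value on the list side, both for normal mode (false) and comment mode (true)
lemma pvMachine_eq_split (l : List Char) :
    pvMachine l false =
      (l.splitOn '#').headD [] ++ (((l.splitOn '#').drop 1).map pvPartTail).flatten ∧
    pvMachine l true = ((l.splitOn '#').map pvPartTail).flatten := by
  induction l with
  | nil => simp [pvMachine, List.splitOn, List.splitOnP_nil, pvPartTail]
  | cons c cs ih =>
    obtain ⟨ihf, iht⟩ := ih
    obtain ⟨p, ps, hps⟩ := List.exists_cons_of_ne_nil (List.splitOnP_ne_nil (· == '#') cs)
    constructor
    · by_cases h : c = '#'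
      · simp [pvMachine, h, List.splitOn, List.splitOnP_cons, iht]
      · simp [pvMachine, h, List.splitOn, List.splitOnP_cons] at ihf iht ⊢
        rw [hps] at ihf ⊢
        simpa using ihf
    · by_cases hn : c = '\n'
      · have hne : ¬ c = '#' := by simp [hn]
        simp [pvMachine, hn, List.splitOn, List.splitOnP_cons] at ihf ⊢
        rw [hps] at ihf ⊢
        simpa [pvPartTail, hn] using ihf
      · by_cases h : c = '#'
        · simp [pvMachine, h, List.splitOn, List.splitOnP_cons, iht, pvPartTail]
        · simp [pvMachine, hn, h, List.splitOn, List.splitOnP_cons] at iht ⊢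
          rw [hps] at iht ⊢
          simpa [pvPartTail, hn] using iht

-- ===== VERDICT (by name: the statement is the Claim_ definition above) =====
theorem get_str_ncomment_spec : Claim_equal_get_str_ncomment := by
  intro str_ _
  unfold Spec_get_str_ncomment get_str_ncomment get_str_ncomment_alt
  rw [show (fun (s : List Char × Bool) i =>
      if s.2 = true then (if i = '\n' then (s.1, false) else s)
      else if i = '#' then (s.1, true)
      else (s.1 ++ [i], s.2)) = pvStep from rfl]
  simp [pvFold_eq, (pvMachine_eq_split str_.toList).1]
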